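-- pv_equiv track=rewrite | github.com/SungwookYoon/FLACON | main.py | _dfs_collect_group
-- ===== SOURCE A (Python) =====
-- def _dfs_collect_group(start_id, link_graph, visited):
--     """Collect connected document groups using DFS"""
--     group = []
--     stack = [start_id]
--
--     while stack:
--         current = stack.pop()
--         if current not in visited:
--             visited.add(current)
--             group.append(current)
--
--             # Add connected documents to stack
--             if current in link_graph:
--                 for linked_doc, _ in link_graph[current]:
--                     if linked_doc not in visited:
--                         stack.append(linked_doc)
--
--     return group
-- ===== SOURCE B (Python) =====
-- def _dfs_collect_group(start_id, link_graph, visited):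
--     """Collect connected document groups using recursive DFS (same visit order as the stack version)."""
--     group = []
--
--     def dfs(node):
--         if node in visited:
--             return
--         visited.add(node)
--         group.append(node)
--         for linked_doc, _ in reversed(link_graph.get(node, ())):
--             dfs(linked_doc)
--
--     dfs(start_id)
--     return group
-- ===== Notes on version B (the rewrite author's own statement) =====
-- stated objective: simpler
-- what changed: Replaces the explicit-stack while-loop (with its push-time and pop-time membership tests) by a recursive DFS helper that marks a node, appends it to the group and recurses into its neighbours in reversed order, giving the identical visit order.
import Mathlib
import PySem

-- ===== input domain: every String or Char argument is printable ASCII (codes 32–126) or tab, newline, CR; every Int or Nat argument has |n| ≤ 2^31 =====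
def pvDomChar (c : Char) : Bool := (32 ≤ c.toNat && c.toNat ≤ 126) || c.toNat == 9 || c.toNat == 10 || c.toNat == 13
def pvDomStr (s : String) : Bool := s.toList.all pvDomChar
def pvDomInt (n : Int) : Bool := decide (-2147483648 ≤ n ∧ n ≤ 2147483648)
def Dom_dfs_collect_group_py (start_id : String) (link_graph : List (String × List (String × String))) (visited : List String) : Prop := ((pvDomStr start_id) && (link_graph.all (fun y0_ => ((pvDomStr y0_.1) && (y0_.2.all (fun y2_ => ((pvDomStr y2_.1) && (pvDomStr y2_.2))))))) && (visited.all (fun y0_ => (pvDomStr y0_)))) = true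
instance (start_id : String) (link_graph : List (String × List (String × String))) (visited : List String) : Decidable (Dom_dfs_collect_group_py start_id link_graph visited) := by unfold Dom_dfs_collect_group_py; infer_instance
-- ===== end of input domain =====

-- B replaces A's explicit stack with a recursive DFS (neighbours in reversed order, so the
-- visit order is identical); both mutate `visited` in place in Python, and the equivalence
-- proved here is about the returned group (the mutation of `visited` is the same in both).
-- Objective: simpler (no stack bookkeeping, no duplicated membership test).

-- All node names occurring in the graph (keys and link targets); only used as a
-- termination/fuel measure, never by the algorithms' results.
def pvU (lg : List (String × List (String × String))) : List String :=
  lg.flatMap (fun kv => kv.1 :: kv.2.map Prod.fst)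

-- Number of graph-node occurrences not yet visited: the decreasing measure.
def pvL (lg : List (String × List (String × String))) (v : List String) : Nat :=
  ((pvU lg).filter (fun x => !(v.contains x))).length

theorem pvAdd_filter_sublist (lg : List (String × List (String × String))) (v : List String)
    (c : String) :
    List.Sublist ((pvU lg).filter (fun x => !((PySem.Set.add v c).contains x)))
      ((pvU lg).filter (fun x => !(v.contains x))) := by
  apply List.monotone_filter_right
  intro a ha
  simp only [Bool.not_eq_true'] at ha ⊢
  have ha' : a ∉ PySem.Set.add v c := by simpa using ha
  have : a ∉ v := fun hmem => ha' (by rw [PySem.Set.mem_add]; exact Or.inl hmem)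
  simpa using this

theorem pvL_add_le (lg : List (String × List (String × String))) (v : List String) (c : String) :
    pvL lg (PySem.Set.add v c) ≤ pvL lg v :=
  (pvAdd_filter_sublist lg v c).length_le

theorem pvL_add_lt (lg : List (String × List (String × String))) (v : List String) (c : String)
    (hU : c ∈ pvU lg) (hc : c ∉ v) :
    pvL lg (PySem.Set.add v c) < pvL lg v := by
  have hsub := pvAdd_filter_sublist lg v c
  apply lt_of_le_of_ne hsub.length_le
  intro hlen
  have heq := hsub.eq_of_length hlen
  have hcmem : c ∈ (pvU lg).filter (fun x => !(v.contains x)) := by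
    simp [List.mem_filter, hU, hc]
  rw [← heq] at hcmem
  have h2 := (List.mem_filter.mp hcmem).2
  simp only [Bool.not_eq_true'] at h2
  have h2' : c ∉ PySem.Set.add v c := by simpa using h2
  exact h2' (by rw [PySem.Set.mem_add]; exact Or.inr rfl)

theorem pvU_of_get? (lg : List (String × List (String × String))) (c : String)
    (nbrs : List (String × String)) (h : (PySem.Dict.mk lg).get? c = some nbrs) :
    c ∈ pvU lg := by
  induction lg with
  | nil => simp [PySem.Dict.get?] at h
  | cons kv rest ih =>
    rw [PySem.Dict.get?_mk_cons] at h
    by_cases hk : (kv.1 == c) = true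
    · have hkc : kv.1 = c := by simpa using hk
      unfold pvU
      rw [List.flatMap_cons]
      exact List.mem_append_left _ (hkc ▸ List.mem_cons_self)
    · rw [if_neg (by simpa using hk)] at h
      unfold pvU
      rw [List.flatMap_cons]
      exact List.mem_append_right _ (ih h)

-- ===== PORT A =====
-- A's while-loop over an explicit stack; the stack is a Lean list whose HEAD is the
-- Python list's END (Python appends and pops at the same end), so pushing the neighbours
-- in order is a left fold consing each unvisited neighbour onto the stack.
def pvLoopA (lg : List (String × List (String × String))) (stack : List String)
    (v : List String) (g : List String) : List String :=
  match stack with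
  | [] => g
  | current :: rest =>
    if hv : v.contains current then pvLoopA lg rest v g
    else
      match hg : (PySem.Dict.mk lg).get? current with
      | none => pvLoopA lg rest (PySem.Set.add v current) (g ++ [current])
      | some nbrs =>
          pvLoopA lg
            (nbrs.foldl (fun st p =>
              if !((PySem.Set.add v current).contains p.1) then p.1 :: st else st) rest)
            (PySem.Set.add v current) (g ++ [current])
  termination_by (pvL lg v, stack.length)
  decreasing_by
  · exact Prod.Lex.right _ (by simp)
  · rcases lt_or_eq_of_le (pvL_add_le lg v current) with h | h
    · exact Prod.Lex.left _ _ h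
    · rw [h]; exact Prod.Lex.right _ (by simp)
  · exact Prod.Lex.left _ _
      (pvL_add_lt lg v current (pvU_of_get? lg current nbrs hg) (by simpa using hv))

def dfs_collect_group_py (start_id : String) (link_graph : List (String × List (String × String))) (visited : List String) : List String :=
  pvLoopA link_graph [start_id] visited []

-- ===== PORT B =====
-- B's recursive dfs; `fuel` is a pure totality device (a bound on the recursion depth),
-- proven irrelevant once it exceeds the number of unvisited graph nodes (pvDfsB_congr below).
def pvDfsB (lg : List (String × List (String × String))) (fuel : Nat) (node : String)
    (v : List String) (g : List String) : List String × List String :=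
  match fuel with
  | 0 => (v, g)  -- never reached from dfs_collect_group_py_alt's initial fuel
  | f + 1 =>
    if v.contains node then (v, g)
    else
      ((PySem.Dict.mk lg).getD node []).reverse.foldl
        (fun p q => pvDfsB lg f q.1 p.1 p.2) (PySem.Set.add v node, g ++ [node])

def dfs_collect_group_py_alt (start_id : String) (link_graph : List (String × List (String × String))) (visited : List String) : List String :=
  (pvDfsB link_graph (pvL link_graph visited + 1) start_id visited []).2

-- ===== PRECONDITION & SPEC =====
def Spec_dfs_collect_group_py (start_id : String) (link_graph : List (String × List (String × String))) (visited : List String) (out : List String) : Prop := out = dfs_collect_group_py_alt start_id link_graph visited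
instance (start_id : String) (link_graph : List (String × List (String × String))) (visited : List String) (out : List String) : Decidable (Spec_dfs_collect_group_py start_id link_graph visited out) := by unfold Spec_dfs_collect_group_py; infer_instance

-- ===== CLAIM (what is proved, stated in full; the proofs are below) =====
def Claim_equal_dfs_collect_group_py : Prop := ∀ (start_id : String) (link_graph : List (String × List (String × String))) (visited : List String), Dom_dfs_collect_group_py start_id link_graph visited → Spec_dfs_collect_group_py start_id link_graph visited (dfs_collect_group_py start_id link_graph visited)

-- ===== LEMMAS AND PROOFS =====

-- B's recursion over a pending list of nodes, all at the same fuel.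
def pvFold (lg : List (String × List (String × String))) (f : Nat) (t : List String)
    (p : List String × List String) : List String × List String :=
  t.foldl (fun p x => pvDfsB lg f x p.1 p.2) p

-- s is t with some already-visited entries dropped (A filters at push time, B does not).
inductive PvSub (v : List String) : List String → List String → Prop
  | nil : PvSub v [] []
  | keep (x : String) {s t : List String} : PvSub v s t → PvSub v (x :: s) (x :: t)
  | drop (x : String) {s t : List String} : x ∈ v → PvSub v s t → PvSub v s (x :: t)

theorem pvMem_add (v : List String) (c a : String) (h : a ∈ v) : a ∈ PySem.Set.add v c := by
  rw [PySem.Set.mem_add]; exact Or.inl h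

theorem pvSub_mono {v w s t : List String}
    (hvw : ∀ x, x ∈ v → x ∈ w) (h : PvSub v s t) : PvSub w s t := by
  induction h with
  | nil => exact PvSub.nil
  | keep x _ ih => exact PvSub.keep x ih
  | drop x hx _ ih => exact PvSub.drop x (hvw x hx) ih

theorem pvSub_append {v a b s t : List String} (h1 : PvSub v a b) (h2 : PvSub v s t) :
    PvSub v (a ++ s) (b ++ t) := by
  induction h1 with
  | nil => exact h2
  | keep x _ ih => exact PvSub.keep x ih
  | drop x hx _ ih => exact PvSub.drop x hx ih

theorem pvSub_filter (v l : List String) :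
    PvSub v (l.filter (fun d => !(PySem.Set.contains v d))) l := by
  induction l with
  | nil => exact PvSub.nil
  | cons a l ih =>
    rw [List.filter_cons]
    by_cases h : a ∈ v
    · have hc : PySem.Set.contains v a = true := by
        simpa [PySem.Set.contains_iff] using h
      rw [hc]
      exact PvSub.drop a h ih
    · have hc : PySem.Set.contains v a = false := by
        rw [Bool.eq_false_iff]
        intro hcc
        exact h ((PySem.Set.contains_iff (s := v) (x := a)).mp hcc)
      rw [hc]
      exact PvSub.keep a ih

theorem pvDfsB_contains (lg : List (String × List (String × String))) (f : Nat)
    (node : String) (v g : List String) (h : v.contains node = true) :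
    pvDfsB lg f node v g = (v, g) := by
  cases f with
  | zero => rfl
  | succ f => rw [pvDfsB, if_pos h]

theorem pvDfsB_L_le (lg : List (String × List (String × String))) :
    ∀ (f : Nat) (node : String) (v g : List String),
      pvL lg ((pvDfsB lg f node v g).1) ≤ pvL lg v := by
  intro f
  induction f with
  | zero => intro node v g; exact le_refl _
  | succ f ih =>
    intro node v g
    rw [pvDfsB]
    by_cases h : v.contains node = true
    · rw [if_pos h]
    · rw [if_neg h]
      have key : ∀ (l : List (String × String)) (p : List String × List String),
          pvL lg ((l.foldl (fun p q => pvDfsB lg f q.1 p.1 p.2) p).1) ≤ pvL lg p.1 := by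
        intro l
        induction l with
        | nil => intro p; exact le_refl _
        | cons q l ihl =>
          intro p
          calc pvL lg (((q :: l).foldl (fun p q => pvDfsB lg f q.1 p.1 p.2) p).1)
              ≤ pvL lg ((pvDfsB lg f q.1 p.1 p.2).1) := by
                rw [List.foldl_cons]; exact ihl (pvDfsB lg f q.1 p.1 p.2)
            _ ≤ pvL lg p.1 := ih q.1 p.1 p.2
      exact le_trans (key _ _) (pvL_add_le lg v node)

theorem pvDfsB_congr (lg : List (String × List (String × String))) :
    ∀ (n : Nat) (v : List String), pvL lg v ≤ n →
    ∀ (f f' : Nat) (node : String) (g : List String),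
      pvL lg v < f → pvL lg v < f' → pvDfsB lg f node v g = pvDfsB lg f' node v g := by
  intro n
  induction n using Nat.strong_induction_on with
  | _ n IH =>
    intro v hn f f' node g hf hf'
    match f, f' with
    | 0, _ => omega
    | _ + 1, 0 => omega
    | fa + 1, fb + 1 =>
      rw [pvDfsB, pvDfsB]
      by_cases hv : v.contains node = true
      · rw [if_pos hv, if_pos hv]
      · rw [if_neg hv, if_neg hv]
        rcases hg : (PySem.Dict.mk lg).get? node with _ | nbrs
        · rw [PySem.Dict.getD_eq_get?_getD, hg]
          rfl
        · have hU : node ∈ pvU lg := pvU_of_get? lg node nbrs hg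
          have hlt : pvL lg (PySem.Set.add v node) < pvL lg v :=
            pvL_add_lt lg v node hU (by simpa using hv)
          have key : ∀ (l : List (String × String)) (p : List String × List String),
              pvL lg p.1 ≤ pvL lg (PySem.Set.add v node) →
              l.foldl (fun p q => pvDfsB lg fa q.1 p.1 p.2) p
                = l.foldl (fun p q => pvDfsB lg fb q.1 p.1 p.2) p := by
            intro l
            induction l with
            | nil => intro p _; rfl
            | cons q l ihl =>
              intro p hp
              have hstep : pvDfsB lg fa q.1 p.1 p.2 = pvDfsB lg fb q.1 p.1 p.2 := by
                by_cases hq : p.1.contains q.1 = true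
                · rw [pvDfsB_contains lg fa q.1 p.1 p.2 hq, pvDfsB_contains lg fb q.1 p.1 p.2 hq]
                · exact IH (pvL lg p.1) (by omega) p.1 le_rfl fa fb q.1 p.2 (by omega) (by omega)
              rw [List.foldl_cons, List.foldl_cons, hstep]
              exact ihl (pvDfsB lg fb q.1 p.1 p.2)
                (le_trans (by rw [← hstep]; exact pvDfsB_L_le lg fa q.1 p.1 p.2) hp)
          exact key _ _ le_rfl

theorem pvFold_congr (lg : List (String × List (String × String)))
    (m : List String) : ∀ (f f' : Nat) (p : List String × List String),
      pvL lg p.1 < f → pvL lg p.1 < f' → pvFold lg f m p = pvFold lg f' m p := by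
  induction m with
  | nil => intro f f' p _ _; rfl
  | cons x m ih =>
    intro f f' p hf hf'
    have hstep : pvDfsB lg f x p.1 p.2 = pvDfsB lg f' x p.1 p.2 :=
      pvDfsB_congr lg (pvL lg p.1) p.1 le_rfl f f' x p.2 hf hf'
    unfold pvFold
    rw [List.foldl_cons, List.foldl_cons, hstep]
    exact ih f f' (pvDfsB lg f' x p.1 p.2)
      (lt_of_le_of_lt (by rw [← hstep]; exact pvDfsB_L_le lg f x p.1 p.2) hf)
      (lt_of_le_of_lt (by rw [← hstep]; exact pvDfsB_L_le lg f x p.1 p.2) hf')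

theorem pvPush_eq (w : List String) :
    ∀ (l : List (String × String)) (st : List String),
      l.foldl (fun st p => if !(PySem.Set.contains w p.1) then p.1 :: st else st) st
        = ((l.map Prod.fst).filter (fun d => !(PySem.Set.contains w d))).reverse ++ st := by
  intro l
  induction l with
  | nil => intro st; rfl
  | cons p l ih =>
    intro st
    rw [List.foldl_cons, List.map_cons, List.filter_cons]
    cases hb : PySem.Set.contains w p.1 with
    | false =>
      simp only [hb, Bool.not_false, if_pos]
      rw [ih (p.1 :: st), List.reverse_cons, List.append_assoc]
      rfl
    | true =>
      simp only [hb, Bool.not_true, Bool.false_eq_true, if_neg, not_false_iff]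
      exact ih st

theorem pvMain (lg : List (String × List (String × String))) :
    ∀ (n : Nat) (t s v g : List String) (f : Nat),
      pvL lg v ≤ n → pvL lg v < f → PvSub v s t →
      pvLoopA lg s v g = (pvFold lg f t (v, g)).2 := by
  intro n
  induction n using Nat.strong_induction_on with
  | _ n IH =>
    intro t
    induction t with
    | nil =>
      intro s v g f _ _ hsub
      cases hsub
      rw [pvLoopA]
      rfl
    | cons x t iht =>
      intro s v g f hn hf hsub
      cases hsub with
      | drop _ hx hsub' =>
        unfold pvFold
        rw [List.foldl_cons, pvDfsB_contains lg f x v g (by simpa using hx)]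
        exact iht s v g f hn hf hsub'
      | keep _ hsub' =>
        rename_i s'
        unfold pvFold
        rw [List.foldl_cons]
        by_cases hv : v.contains x = true
        · rw [pvLoopA, dif_pos hv, pvDfsB_contains lg f x v g hv]
          exact iht s' v g f hn hf hsub'
        · have hmono : ∀ y, y ∈ v → y ∈ PySem.Set.add v x := fun y hy => pvMem_add v x y hy
          match f, hf with
          | fb + 1, hf =>
            rw [pvDfsB, if_neg hv]
            rcases hg : (PySem.Dict.mk lg).get? x with _ | nbrs
            · -- x is not a key: no neighbours on either side
              rw [pvLoopA, dif_neg hv]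
              split
              · rw [PySem.Dict.getD_eq_get?_getD, hg]
                simp only [Option.getD_none, List.reverse_nil, List.foldl_nil]
                exact iht s' (PySem.Set.add v x) (g ++ [x]) (fb + 1)
                  (le_trans (pvL_add_le lg v x) hn) (lt_of_le_of_lt (pvL_add_le lg v x) hf)
                  (pvSub_mono hmono hsub')
              · next _ heq => rw [hg] at heq; simp at heq
            · have hU : x ∈ pvU lg := pvU_of_get? lg x nbrs hg
              have hlt : pvL lg (PySem.Set.add v x) < pvL lg v :=
                pvL_add_lt lg v x hU (by simpa using hv)
              rw [pvLoopA, dif_neg hv]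
              split
              · next heq => rw [hg] at heq; simp at heq
              next nbrs1 heq =>
              rw [hg] at heq
              injection heq with heq'
              subst heq'
              -- A's push loop as filter-reverse-append
              rw [pvPush_eq]
              -- B's neighbour fold as a pvFold over node names
              have hB : ((PySem.Dict.mk lg).getD x []).reverse.foldl
                    (fun p q => pvDfsB lg fb q.1 p.1 p.2) (PySem.Set.add v x, g ++ [x])
                  = pvFold lg fb (nbrs.reverse.map Prod.fst) (PySem.Set.add v x, g ++ [x]) := by
                rw [PySem.Dict.getD_eq_get?_getD, hg]
                unfold pvFold
                rw [List.foldl_map]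
                simp only [Option.getD_some]
              rw [hB]
              rw [pvFold_congr lg (nbrs.reverse.map Prod.fst) fb (fb + 1)
                    (PySem.Set.add v x, g ++ [x])
                    (show pvL lg (PySem.Set.add v x) < fb by omega)
                    (show pvL lg (PySem.Set.add v x) < fb + 1 by omega)]
              have happ : List.foldl (fun p x => pvDfsB lg (fb + 1) x p.1 p.2)
                    (pvFold lg (fb + 1) (nbrs.reverse.map Prod.fst) (PySem.Set.add v x, g ++ [x])) t
                  = pvFold lg (fb + 1) (nbrs.reverse.map Prod.fst ++ t)
                      (PySem.Set.add v x, g ++ [x]) := by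
                unfold pvFold
                rw [List.foldl_append]
              rw [happ]
              have hsubnew : PvSub (PySem.Set.add v x)
                  (((nbrs.map Prod.fst).filter
                      (fun d => !(PySem.Set.contains (PySem.Set.add v x) d))).reverse ++ s')
                  (nbrs.reverse.map Prod.fst ++ t) := by
                apply pvSub_append _ (pvSub_mono hmono hsub')
                rw [← List.filter_reverse, ← List.map_reverse]
                exact pvSub_filter _ _
              exact IH (pvL lg (PySem.Set.add v x)) (by omega)
                (nbrs.reverse.map Prod.fst ++ t) _ (PySem.Set.add v x) (g ++ [x]) (fb + 1)
                le_rfl (by omega) hsubnew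

-- ===== VERDICT (by name: the statement is the Claim_ definition above) =====
theorem dfs_collect_group_py_spec : Claim_equal_dfs_collect_group_py := by
  intro start_id link_graph visited _
  unfold Spec_dfs_collect_group_py dfs_collect_group_py dfs_collect_group_py_alt
  have h := pvMain link_graph (pvL link_graph visited) [start_id] [start_id] visited []
    (pvL link_graph visited + 1) le_rfl (by omega)
    (PvSub.keep start_id PvSub.nil)
  rw [h]
  rfl
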